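-- pv_equiv track=rewrite | github.com/kurtrm/kurt_data | tmobile_bill_parser.py | _parse_continuous_records
-- ===== SOURCE A (Python) =====
-- def _parse_continuous_records(prepared_page, bill_dict, section_dict):
--     """Handle parsing a continuous list of records."""
--     columns = 6
--     start = prepared_page.index('Date and time')
--     for i, column in enumerate(prepared_page[start:start + columns]):
--         column_index = start + i
--         values = prepared_page[column_index + columns::columns]
--         if column in section_dict:
--             section_dict[column] = section_dict[column] + values
--         else:
--             section_dict[column] = values
--
--     return section_dict
-- ===== SOURCE B (Python) =====
-- def _parse_continuous_records(prepared_page, bill_dict, section_dict):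
--     """Single pass over the record area, bucketing values by a cycling column counter."""
--     start = prepared_page.index('Date and time')
--     headers = prepared_page[start:start + 6]
--     buckets = [[] for _ in headers]
--     col = 0
--     for value in prepared_page[start + 6:]:
--         if col < len(buckets):
--             buckets[col].append(value)
--         col = (col + 1) % 6
--     for header, bucket in zip(headers, buckets):
--         if header in section_dict:
--             section_dict[header] = section_dict[header] + bucket
--         else:
--             section_dict[header] = bucket
--     return section_dict
-- ===== Notes on version B (the rewrite author's own statement) =====
-- stated objective: alternative
-- what changed: B makes a single pass over the record area, appending each value to a bucket selected by a cycling column counter, then merges the buckets into section_dict, instead of A's six separate strided slices prepared_page[start+i+6::6].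
import Mathlib
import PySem

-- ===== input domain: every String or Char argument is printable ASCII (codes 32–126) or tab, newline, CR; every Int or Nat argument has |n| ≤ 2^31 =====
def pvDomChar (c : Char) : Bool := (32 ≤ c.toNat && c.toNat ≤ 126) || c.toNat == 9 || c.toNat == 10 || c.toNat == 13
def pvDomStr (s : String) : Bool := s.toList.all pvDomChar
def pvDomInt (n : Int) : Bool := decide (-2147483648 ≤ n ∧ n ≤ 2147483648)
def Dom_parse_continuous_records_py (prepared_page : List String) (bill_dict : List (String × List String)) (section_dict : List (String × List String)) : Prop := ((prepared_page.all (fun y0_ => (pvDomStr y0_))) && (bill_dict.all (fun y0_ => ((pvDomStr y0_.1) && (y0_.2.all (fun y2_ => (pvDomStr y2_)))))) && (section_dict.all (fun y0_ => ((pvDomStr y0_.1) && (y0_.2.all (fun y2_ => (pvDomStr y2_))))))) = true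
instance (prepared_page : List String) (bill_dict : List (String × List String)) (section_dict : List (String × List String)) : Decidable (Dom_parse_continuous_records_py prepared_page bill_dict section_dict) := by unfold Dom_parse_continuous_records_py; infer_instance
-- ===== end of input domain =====

-- B replaces A's six strided slices by one pass over the record area with a cycling column counter
-- (alternative decomposition, same return value); like A, the Python B updates section_dict in place.


-- ===== PORT A =====
-- A mutates section_dict in place in Python (B performs the same mutation); the equivalence proved is about the returned dict.
def parse_continuous_records_py (prepared_page : List String) (bill_dict : List (String × List String)) (section_dict : List (String × List String)) : List (String × List String) :=
  match PySem.List.index? prepared_page "Date and time" with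
  | none => []  -- ValueError in Python; excluded by Pre_
  | some start =>
    let d := (PySem.List.enumerate (PySem.List.slice prepared_page (some (start : Int)) (some ((start : Int) + 6))) 0).foldl
      (fun (d : PySem.Dict String (List String)) (p : Int × String) =>
        let values := (PySem.List.slice? prepared_page (some ((start : Int) + p.1 + 6)) none 6).getD []
        if d.contains p.2 then d.insert p.2 (d.getD p.2 [] ++ values)
        else d.insert p.2 values)
      (PySem.Dict.ofList section_dict)
    d.items

-- ===== PORT B =====
def parse_continuous_records_py_alt (prepared_page : List String) (bill_dict : List (String × List String)) (section_dict : List (String × List String)) : List (String × List String) :=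
  match PySem.List.index? prepared_page "Date and time" with
  | none => []  -- ValueError in Python; excluded by Pre_
  | some start =>
    let headers := PySem.List.slice prepared_page (some (start : Int)) (some ((start : Int) + 6))
    let buckets := (List.foldl
      (fun (st : List (List String) × Nat) (v : String) =>
        ((if st.2 < st.1.length then st.1.set st.2 (st.1[st.2]! ++ [v]) else st.1), (st.2 + 1) % 6))
      (headers.map (fun _ => ([] : List String)), 0)
      (prepared_page.drop (start + 6))).1
    let d := (headers.zip buckets).foldl
      (fun (d : PySem.Dict String (List String)) (p : String × List String) =>
        if d.contains p.1 then d.insert p.1 (d.getD p.1 [] ++ p.2)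
        else d.insert p.1 p.2)
      (PySem.Dict.ofList section_dict)
    d.items

-- ===== PRECONDITION & SPEC =====
-- Pre_: A raises ValueError (list.index) when 'Date and time' is absent from prepared_page.
def Pre_parse_continuous_records_py (prepared_page : List String) (bill_dict : List (String × List String)) (section_dict : List (String × List String)) : Prop :=
  "Date and time" ∈ prepared_page
instance (prepared_page : List String) (bill_dict : List (String × List String)) (section_dict : List (String × List String)) : Decidable (Pre_parse_continuous_records_py prepared_page bill_dict section_dict) := by unfold Pre_parse_continuous_records_py; infer_instance
def pvWitness_parse_continuous_records_py : List String × (List (String × List String)) × (List (String × List String)) :=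
  (["Date and time", "Number", "a", "b", "c", "d", "09/14", "555", "x", "y", "z", "w", "09/15"], [], [("Number", ["old"])])

def Spec_parse_continuous_records_py (prepared_page : List String) (bill_dict : List (String × List String)) (section_dict : List (String × List String)) (out : List (String × List String)) : Prop := out = parse_continuous_records_py_alt prepared_page bill_dict section_dict
instance (prepared_page : List String) (bill_dict : List (String × List String)) (section_dict : List (String × List String)) (out : List (String × List String)) : Decidable (Spec_parse_continuous_records_py prepared_page bill_dict section_dict out) := by unfold Spec_parse_continuous_records_py; infer_instance

-- ===== CLAIM (what is proved, stated in full; the proofs are below) =====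
def Claim_equal_parse_continuous_records_py : Prop := ∀ (prepared_page : List String) (bill_dict : List (String × List String)) (section_dict : List (String × List String)), Dom_parse_continuous_records_py prepared_page bill_dict section_dict → Pre_parse_continuous_records_py prepared_page bill_dict section_dict → Spec_parse_continuous_records_py prepared_page bill_dict section_dict (parse_continuous_records_py prepared_page bill_dict section_dict)

-- ===== LEMMAS AND PROOFS =====

-- every 6th element of a list, starting with the head
def pvStride6 {α : Type} : List α → List α
  | [] => []
  | x :: r => x :: pvStride6 (r.drop 5)
termination_by l => l.length
decreasing_by simp

theorem pvStride6_filterMap {α : Type} (ys : List α) :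
    (List.range ((ys.length + 5) / 6)).filterMap (fun k => ys[6 * k]?) = pvStride6 ys := by
  induction ys using pvStride6.induct with
  | case1 => simp [pvStride6]
  | case2 x r ih =>
    have hc : ((x :: r).length + 5) / 6 = ((r.drop 5).length + 5) / 6 + 1 := by
      simp [List.length_drop]; omega
    have hpt : (fun (k : Nat) => (x :: r)[6 * (k + 1)]?) = (fun (k : Nat) => (r.drop 5)[6 * k]?) := by
      funext k
      rw [List.getElem?_drop]
      have h6 : 6 * (k + 1) = (5 + 6 * k) + 1 := by ring
      rw [h6, List.getElem?_cons_succ]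
    rw [hc, List.range_succ_eq_map, List.filterMap_cons]
    simp only [List.filterMap_map, Function.comp_def, hpt, ih]
    simp [pvStride6]

theorem pvSlice_stride {α : Type} (xs : List α) (n : Nat) :
    PySem.List.slice? xs (some (n : Int)) none 6 = some (pvStride6 (xs.drop n)) := by
  unfold PySem.List.slice? PySem.List.sliceIndices
  simp only [if_neg (by norm_num : ¬ (6:Int) = 0)]
  norm_num
  simp only [if_neg (not_lt.mpr (Int.natCast_nonneg n))]
  have hm : (min (n : Int) (xs.length : Int)) = ((min n xs.length : Nat) : Int) := by push_cast; rfl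
  rw [hm]
  have hcount : (if ((min n xs.length : Nat) : Int) < (xs.length : Int) then
      (((xs.length : Int) - ((min n xs.length : Nat) : Int) + 6 - 1) / 6).toNat else 0)
      = ((xs.length - min n xs.length) + 5) / 6 := by
    split_ifs with h
    · omega
    · omega
  rw [hcount]
  have hel : (fun (x : Nat) => xs[(((min n xs.length : Nat) : Int) + 6 * (x : Int)).toNat]?)
      = (fun (x : Nat) => (xs.drop (min n xs.length))[6 * x]?) := by
    funext x
    rw [List.getElem?_drop]
    have h : ((((min n xs.length : Nat)) : Int) + 6 * (x : Int)).toNat = min n xs.length + 6 * x := by omega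
    rw [h]
  rw [hel]
  have hdrop : xs.drop n = xs.drop (min n xs.length) := by
    rcases Nat.le_total n xs.length with h | h
    · rw [Nat.min_eq_left h]
    · rw [Nat.min_eq_right h, List.drop_of_length_le h, List.drop_length]
  have hlen : xs.length - min n xs.length = (xs.drop (min n xs.length)).length := by
    simp
  rw [hdrop, hlen, pvStride6_filterMap]

theorem pvEnumerate_eq {α : Type} [Inhabited α] (ys : List α) (s : Int) :
    PySem.List.enumerate ys s = (List.range ys.length).map (fun (k : Nat) => (s + (k : Int), ys[k]!)) := by
  induction ys generalizing s with
  | nil => simp [PySem.List.enumerate]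
  | cons x t ih =>
    rw [PySem.List.enumerate_cons, ih, List.length_cons, List.range_succ_eq_map]
    simp [List.map_map, Function.comp]
    intro a _; ring

theorem pvMap_range_getElem! {α : Type} [Inhabited α] (bs : List α) :
    (List.range bs.length).map (fun i => bs[i]!) = bs := by
  apply List.ext_getElem
  · simp
  · intro i h1 h2
    simp at h1 ⊢
    simp [List.getElem?_eq_getElem h1]

theorem pvBuckets_inv {α : Type} (tail : List α) (bs : List (List α)) (p : Nat)
    (hp : p < 6) (hb : bs.length ≤ 6) :
    (List.foldl
      (fun (st : List (List α) × Nat) (v : α) =>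
        ((if st.2 < st.1.length then st.1.set st.2 (st.1[st.2]! ++ [v]) else st.1), (st.2 + 1) % 6))
      (bs, p) tail).1
    = (List.range bs.length).map (fun i => bs[i]! ++ pvStride6 (tail.drop ((i + 6 - p) % 6))) := by
  induction tail generalizing bs p with
  | nil =>
    simp only [List.foldl_nil, List.drop_nil, pvStride6, List.append_nil]
    exact (pvMap_range_getElem! bs).symm
  | cons v rest ih =>
    rw [List.foldl_cons]
    by_cases hpl : p < bs.length
    · simp only [if_pos hpl]
      rw [ih (bs.set p (bs[p]! ++ [v])) ((p + 1) % 6) (by omega) (by simpa using hb)]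
      rw [List.length_set]
      apply List.map_congr_left
      intro i hi
      rw [List.mem_range] at hi
      by_cases hip : i = p
      · subst hip
        have h5 : (i + 6 - (i + 1) % 6) % 6 = 5 := by omega
        have h0 : (i + 6 - i) % 6 = 0 := by omega
        rw [h5, h0, List.drop_zero, getElem!_pos (bs.set i (bs[i]! ++ [v])) i (by simpa using hi),
            List.getElem_set_self]
        simp [pvStride6]
      · have hd : (i + 6 - p) % 6 = (i + 6 - (p + 1) % 6) % 6 + 1 := by omega
        rw [hd, List.drop_succ_cons, getElem!_pos (bs.set p (bs[p]! ++ [v])) i (by simpa using hi),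
            List.getElem_set_ne (by omega), ← getElem!_pos bs i hi]
    · simp only [if_neg hpl]
      rw [ih bs ((p + 1) % 6) (by omega) hb]
      apply List.map_congr_left
      intro i hi
      rw [List.mem_range] at hi
      have hip : i ≠ p := by omega
      have hd : (i + 6 - p) % 6 = (i + 6 - (p + 1) % 6) % 6 + 1 := by omega
      rw [hd, List.drop_succ_cons]

-- ===== VERDICT (by name: the statement is the Claim_ definition above) =====
theorem pvMain (prepared_page : List String) (bill_dict : List (String × List String)) (section_dict : List (String × List String))
    (hpre : "Date and time" ∈ prepared_page) :
    parse_continuous_records_py prepared_page bill_dict section_dict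
    = parse_continuous_records_py_alt prepared_page bill_dict section_dict := by
  unfold parse_continuous_records_py parse_continuous_records_py_alt
  cases h : PySem.List.index? prepared_page "Date and time" with
  | none => exact absurd hpre ((PySem.List.index?_eq_none_iff _ _).mp h)
  | some start =>
    simp only []
    congr 1
    have hcast : ((start : Int) + 6) = (((start + 6 : Nat)) : Int) := by push_cast; ring
    set headers := PySem.List.slice prepared_page (some (start : Int)) (some ((start : Int) + 6)) with hH
    have hHts : headers = (prepared_page.drop start).take 6 := by
      rw [hH, hcast, PySem.List.slice_natCast]
      congr 1
      omega
    have hlen6 : headers.length ≤ 6 := by rw [hHts]; simp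
    set tail := prepared_page.drop (start + 6) with hT
    rw [pvBuckets_inv tail (headers.map fun _ => ([] : List String)) 0 (by omega) (by simpa using hlen6)]
    have hbuck : (List.range (headers.map fun _ => ([] : List String)).length).map
        (fun i => (headers.map fun _ => ([] : List String))[i]! ++ pvStride6 (tail.drop ((i + 6 - 0) % 6)))
        = (List.range headers.length).map (fun i => pvStride6 (tail.drop i)) := by
      rw [List.length_map]
      apply List.map_congr_left
      intro i hi
      rw [List.mem_range] at hi
      have h1 : (headers.map fun _ => ([] : List String))[i]! = ([] : List String) := by
        rw [getElem!_pos (headers.map fun _ => ([] : List String)) i (by simpa using hi)]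
        simp
      have h2 : (i + 6 - 0) % 6 = i := by omega
      rw [h1, h2]
      simp
    rw [hbuck]
    have hzip : headers.zip ((List.range headers.length).map (fun i => pvStride6 (tail.drop i)))
        = (List.range headers.length).map (fun k => (headers[k]!, pvStride6 (tail.drop k))) := by
      apply List.ext_getElem
      · simp
      · intro i h1 h2
        simp only [List.length_zip, List.length_map, List.length_range, Nat.min_self] at h1
        simp only [List.getElem_zip, List.getElem_map, List.getElem_range]
        rw [getElem!_pos headers i h1]
    rw [hzip, pvEnumerate_eq headers 0, List.foldl_map, List.foldl_map]
    congr 1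
    funext d k
    simp only []
    have hs : ((start : Int) + ((0 : Int) + (k : Int)) + 6) = (((start + k + 6 : Nat)) : Int) := by
      push_cast; ring
    rw [hs, pvSlice_stride]
    simp only [Option.getD_some]
    rw [hT, List.drop_drop]
    have hnk : start + k + 6 = start + 6 + k := by omega
    rw [hnk]

-- ===== VERDICT (by name: the statement is the Claim_ definition above) =====
theorem parse_continuous_records_py_spec : Claim_equal_parse_continuous_records_py := by
  intro pp bd sd _ hpre
  exact pvMain pp bd sd hpre
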